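-- pv_equiv track=rewrite | github.com/gxnda/project-euler-python | util.py | generate_pentagonal_numbers
-- ===== SOURCE A (Python) =====
-- def generate_pentagonal_numbers(limit):
--     most_recent_num = 0
--     i = 1
--     nums = set()
--     while most_recent_num < limit:
--         most_recent_num = (i * (3 * i - 1)) // 2
--         nums.add(most_recent_num)
--         i += 1
--     return sorted(nums)
-- ===== SOURCE B (Python) =====
-- def generate_pentagonal_numbers(limit):
--     def pents():
--         t, d = 0, 1
--         while t < limit:
--             t += d
--             yield t
--             d += 3
--     return list(pents())
-- ===== Notes on version B (the rewrite author's own statement) =====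
-- stated objective: simpler
-- what changed: B streams pentagonal numbers from a generator using the constant-second-difference recurrence (t += d; d += 3), yielding each value in ascending order, so A's quadratic formula with floor division, the index variable, the set and the final sort all disappear.
import Mathlib
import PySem

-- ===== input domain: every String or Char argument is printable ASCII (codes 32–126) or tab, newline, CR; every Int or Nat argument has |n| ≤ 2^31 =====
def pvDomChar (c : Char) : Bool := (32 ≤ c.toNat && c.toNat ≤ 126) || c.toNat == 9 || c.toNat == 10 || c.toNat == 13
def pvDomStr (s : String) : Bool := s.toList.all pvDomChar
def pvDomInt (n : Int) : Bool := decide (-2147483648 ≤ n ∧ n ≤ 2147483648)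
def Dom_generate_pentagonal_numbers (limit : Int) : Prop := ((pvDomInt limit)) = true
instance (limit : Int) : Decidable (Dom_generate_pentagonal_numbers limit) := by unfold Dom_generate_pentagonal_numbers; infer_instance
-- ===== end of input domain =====

-- B streams pentagonal numbers from a generator via the second-difference recurrence
-- (t += d; d += 3), yielded in ascending order; A's formula, index, set and sort disappear (objective: simpler).

-- ===== PORT A =====
-- A's while-loop, made total with fuel (limit.toNat + 1 iterations always suffice:
-- the i-th pentagonal number is ≥ i, so the guard fails after at most limit steps)
def pvALoop : Nat → Int → Int → Int → PySem.Set Int → List Int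
  | 0, _, _, _, nums => PySem.List.sorted nums (fun x => x)
  | fuel+1, limit, most_recent_num, i, nums =>
    if most_recent_num < limit then
      let m := PySem.Int.floordiv (i * (3 * i - 1)) 2
      pvALoop fuel limit m (i + 1) (PySem.Set.add nums m)
    else PySem.List.sorted nums (fun x => x)

def generate_pentagonal_numbers (limit : Int) : List Int :=
  pvALoop (limit.toNat + 1) limit 0 1 PySem.Set.empty

-- ===== PORT B =====
-- B's generator 'pents': each yield becomes a cons; fuel as above
def pvBGen : Nat → Int → Int → Int → List Int
  | 0, _, _, _ => []
  | fuel+1, limit, t, d =>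
    if t < limit then (t + d) :: pvBGen fuel limit (t + d) (d + 3) else []

def generate_pentagonal_numbers_alt (limit : Int) : List Int :=
  pvBGen (limit.toNat + 1) limit 0 1

-- ===== PRECONDITION & SPEC =====
def Spec_generate_pentagonal_numbers (limit : Int) (out : List Int) : Prop := out = generate_pentagonal_numbers_alt limit
instance (limit : Int) (out : List Int) : Decidable (Spec_generate_pentagonal_numbers limit out) := by unfold Spec_generate_pentagonal_numbers; infer_instance

-- ===== CLAIM (what is proved, stated in full; the proofs are below) =====
def Claim_equal_generate_pentagonal_numbers : Prop := ∀ (limit : Int), Dom_generate_pentagonal_numbers limit → Spec_generate_pentagonal_numbers limit (generate_pentagonal_numbers limit)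

-- ===== LEMMAS AND PROOFS =====

-- joint invariant: A's running value 'total' is the (i-1)-st pentagonal number
-- (2*total = (i-1)*(3i-4)), B's difference d equals 3i-2, A's set 'nums' (already
-- strictly increasing, all elements ≤ total) is a prefix of the final answer, and the
-- remaining outputs of A's loop are exactly the stream produced by B's generator.
lemma pvLoop_eq (fuel : Nat) : ∀ (limit total i : Int) (nums : List Int),
    1 ≤ i → 2 * total = (i - 1) * (3 * i - 4) →
    nums.Pairwise (· < ·) → (∀ x ∈ nums, x ≤ total) →
    pvALoop fuel limit total i nums = nums ++ pvBGen fuel limit total (3 * i - 2) := by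
  induction fuel with
  | zero =>
    intro limit total i nums _ _ hpw _
    simpa [pvALoop, pvBGen] using
      PySem.List.sorted_eq_of_perm_of_pairwise_lt nums nums (fun x => x) (List.Perm.refl nums) hpw
  | succ fuel ih =>
    intro limit total i nums hi ht hpw hle
    by_cases hlt : total < limit
    · have hm : PySem.Int.floordiv (i * (3 * i - 1)) 2 = total + (3 * i - 2) := by
        rw [PySem.Int.floordiv_eq_iff_of_pos (by norm_num)]
        constructor <;> nlinarith [ht]
      have hnotmem : total + (3 * i - 2) ∉ nums := by
        intro hmem
        have := hle _ hmem
        omega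
      have hadd : PySem.Set.add nums (total + (3 * i - 2)) = nums ++ [total + (3 * i - 2)] := by
        simp [PySem.Set.add, PySem.Set.contains, hnotmem]
      have hrec := ih limit (total + (3 * i - 2)) (i + 1) (nums ++ [total + (3 * i - 2)])
        (by omega)
        (by ring_nf; nlinarith [ht])
        (by
          refine List.pairwise_append.2 ⟨hpw, List.pairwise_singleton _ _, ?_⟩
          intro x hx y hy
          simp at hy
          have := hle _ hx
          omega)
        (by
          intro x hx
          rcases List.mem_append.1 hx with h | h
          · have := hle _ h; omega
          · simp at h; omega)
      have h3 : 3 * (i + 1) - 2 = (3 * i - 2) + 3 := by ring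
      rw [h3] at hrec
      simp only [pvALoop, pvBGen, hlt, if_pos, hm, hadd, hrec]
      simp
    · simp only [pvALoop, pvBGen, hlt, if_neg, not_false_iff]
      simpa using
        PySem.List.sorted_eq_of_perm_of_pairwise_lt nums nums (fun x => x) (List.Perm.refl nums) hpw

-- ===== VERDICT (by name: the statement is the Claim_ definition above) =====
theorem generate_pentagonal_numbers_spec : Claim_equal_generate_pentagonal_numbers := by
  intro limit _
  unfold Spec_generate_pentagonal_numbers generate_pentagonal_numbers generate_pentagonal_numbers_alt
  have h := pvLoop_eq (limit.toNat + 1) limit 0 1 [] (by norm_num) (by ring) (by simp) (by simp)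
  simpa [PySem.Set.empty] using h
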